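-- pv_equiv track=rewrite | github.com/cschladetsch/Doplhin | tmp/p1.py | longest_odd_subarray
-- ===== SOURCE A (Python) =====
-- def longest_odd_subarray(nums):
--   max_length = 0
--   current_length = 0
--   current_sum = 0
--
--   for num in nums:
--     current_sum += num
--
--     if current_sum % 2 == 1:
--       current_length += 1
--       max_length = max(max_length, current_length)
--     else:
--       current_length = 0
--
--   return max_length
-- ===== SOURCE B (Python) =====
-- def longest_odd_subarray(nums):
--   # pass 1: parity of each prefix sum
--   par = []
--   s = 0
--   for x in nums:
--     s += x
--     par.append(s % 2 == 1)
--   # pass 2: longest run of True in par (run-skipping scan)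
--   best = 0
--   i = 0
--   n = len(par)
--   while i < n:
--     if par[i]:
--       j = i
--       while j < n and par[j]:
--         j += 1
--       best = max(best, j - i)
--       i = j
--     else:
--       i += 1
--   return best
-- ===== Notes on version B (the rewrite author's own statement) =====
-- stated objective: alternative
-- what changed: A's single fused loop (running sum + run counter + max) is decomposed into two passes: first build the list of prefix-sum parities, then find the longest run of odd parities with an explicit run-skipping two-index scan.
import Mathlib
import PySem

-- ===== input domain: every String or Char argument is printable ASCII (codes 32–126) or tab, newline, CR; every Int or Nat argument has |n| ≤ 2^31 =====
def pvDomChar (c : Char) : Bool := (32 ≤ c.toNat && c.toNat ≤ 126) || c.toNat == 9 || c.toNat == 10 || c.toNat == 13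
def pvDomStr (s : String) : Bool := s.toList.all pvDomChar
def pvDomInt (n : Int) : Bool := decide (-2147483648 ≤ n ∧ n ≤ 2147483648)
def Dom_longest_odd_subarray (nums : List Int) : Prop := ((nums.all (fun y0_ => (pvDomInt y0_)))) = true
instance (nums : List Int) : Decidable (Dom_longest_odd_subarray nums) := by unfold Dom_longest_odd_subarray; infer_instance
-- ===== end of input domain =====

-- B replaces A's fused accumulator loop by a two-pass decomposition: build the list of
-- prefix-sum parities, then measure the longest run of odd parities with a run-skipping scan
-- (objective: alternative; same cost).


-- ===== PORT A =====
def longest_odd_subarray (nums : List Int) : Int :=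
  (nums.foldl
    (fun (st : Int × Int × Int) num =>
      if PySem.Int.mod (st.2.2 + num) 2 = 1 then
        (max st.1 (st.2.1 + 1), st.2.1 + 1, st.2.2 + num)
      else
        (st.1, 0, st.2.2 + num))
    (0, 0, 0)).1

-- ===== PORT B =====
-- pass 1 of Source B: parity list of the prefix sums
def altPar (nums : List Int) : List Bool :=
  (nums.foldl
    (fun (acc : List Bool × Int) x =>
      (acc.1 ++ [PySem.Int.mod (acc.2 + x) 2 == 1], acc.2 + x))
    ([], 0)).1

-- inner while of Source B: length of the leading run of `true`
def altRun : List Bool → Nat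
  | true :: rest => altRun rest + 1
  | _ => 0

-- outer while of Source B: run-skipping scan keeping the best run length
def altScan : List Bool → Int → Int
  | [], best => best
  | false :: rest, best => altScan rest best
  | true :: rest, best =>
      altScan (rest.drop (altRun rest)) (max best ((altRun rest + 1 : Nat) : Int))
  termination_by bs _ => bs.length
  decreasing_by
    · simp only [List.length_cons]; omega
    · rw [List.length_drop, List.length_cons]; omega

def longest_odd_subarray_alt (nums : List Int) : Int :=
  altScan (altPar nums) 0

-- ===== PRECONDITION & SPEC =====
def Spec_longest_odd_subarray (nums : List Int) (out : Int) : Prop := out = longest_odd_subarray_alt nums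
instance (nums : List Int) (out : Int) : Decidable (Spec_longest_odd_subarray nums out) := by unfold Spec_longest_odd_subarray; infer_instance

-- ===== CLAIM (what is proved, stated in full; the proofs are below) =====
def Claim_equal_longest_odd_subarray : Prop := ∀ (nums : List Int), Dom_longest_odd_subarray nums → Spec_longest_odd_subarray nums (longest_odd_subarray nums)

-- ===== LEMMAS AND PROOFS =====

-- recursive characterisation of the parity list
def parRec (s : Int) : List Int → List Bool
  | [] => []
  | x :: r => (PySem.Int.mod (s + x) 2 == 1) :: parRec (s + x) r

lemma altPar_fold (nums : List Int) (acc : List Bool) (s : Int) :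
    (nums.foldl
      (fun (acc : List Bool × Int) x =>
        (acc.1 ++ [PySem.Int.mod (acc.2 + x) 2 == 1], acc.2 + x))
      (acc, s)).1 = acc ++ parRec s nums := by
  induction nums generalizing acc s with
  | nil => simp [parRec]
  | cons x r ih =>
      simp only [List.foldl_cons, parRec]
      rw [ih]
      simp

lemma altPar_eq (nums : List Int) : altPar nums = parRec 0 nums := by
  unfold altPar
  exact (altPar_fold nums [] 0).trans (List.nil_append _)

-- mid-level fused scan over the parity list
def fused : List Bool → Int → Int → Int
  | [], _, b => b
  | p :: r, c, b => if p then fused r (c + 1) (max b (c + 1)) else fused r 0 b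

-- A's fold equals `fused` over the parity list
lemma foldA_eq_fused (nums : List Int) (m c s : Int) :
    (nums.foldl
      (fun (st : Int × Int × Int) num =>
        if PySem.Int.mod (st.2.2 + num) 2 = 1 then
          (max st.1 (st.2.1 + 1), st.2.1 + 1, st.2.2 + num)
        else
          (st.1, 0, st.2.2 + num))
      (m, c, s)).1 = fused (parRec s nums) c m := by
  induction nums generalizing m c s with
  | nil => simp [parRec, fused]
  | cons x r ih =>
      simp only [List.foldl_cons, parRec, fused]
      by_cases h : PySem.Int.mod (s + x) 2 = 1
      · rw [if_pos h, ih, if_pos (by simp only [beq_iff_eq]; exact h)]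
      · rw [if_neg h, ih, if_neg (by simp only [beq_iff_eq]; exact h)]

-- the parity list splits at its leading run of `true`
lemma run_split (bs : List Bool) :
    bs = List.replicate (altRun bs) true ++ bs.drop (altRun bs) := by
  induction bs with
  | nil => simp [altRun]
  | cons p r ih =>
      cases p with
      | false => simp [altRun]
      | true =>
          simp only [altRun, List.replicate_succ, List.cons_append, List.drop_succ_cons]
          exact congrArg (true :: ·) ih

lemma drop_run_not_true (bs : List Bool) :
    bs.drop (altRun bs) = [] ∨ ∃ r, bs.drop (altRun bs) = false :: r := by
  induction bs with
  | nil => simp [altRun]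
  | cons p r ih =>
      cases p with
      | false => exact Or.inr ⟨r, rfl⟩
      | true => simpa [altRun] using ih

-- stepping `fused` through a nonempty block of trues
lemma fused_replicate (k : Nat) (r : List Bool) (c b : Int) :
    fused (List.replicate (k + 1) true ++ r) c b
      = fused r (c + ((k + 1 : Nat) : Int)) (max b (c + ((k + 1 : Nat) : Int))) := by
  induction k generalizing c b with
  | zero => simp [fused]
  | succ n ih =>
      simp only [List.replicate_succ (n := n + 1), List.cons_append, fused, if_pos]
      rw [ih]
      have h1 : c + 1 + ((n + 1 : Nat) : Int) = c + ((n + 1 + 1 : Nat) : Int) := by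
        push_cast; ring
      have h2 : max (max b (c + 1)) (c + 1 + ((n + 1 : Nat) : Int))
          = max b (c + ((n + 1 + 1 : Nat) : Int)) := by push_cast; omega
      rw [h1] at *
      rw [h2]

lemma fused_reset (r : List Bool) (c b : Int)
    (h : r = [] ∨ ∃ t, r = false :: t) : fused r c b = fused r 0 b := by
  rcases h with h | ⟨t, h⟩ <;> subst h <;> simp [fused]

-- main: fused with cur = 0 equals B's run-skipping scan
lemma fused_eq_altScan (bs : List Bool) (b : Int) :
    fused bs 0 b = altScan bs b := by
  induction bs, b using altScan.induct with
  | case1 b => simp [fused, altScan]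
  | case2 rest b ih => simpa [fused, altScan] using ih
  | case3 rest b ih =>
      have hshape : (true :: rest)
          = List.replicate (altRun rest + 1) true ++ rest.drop (altRun rest) := by
        rw [List.replicate_succ, List.cons_append]
        exact congrArg (true :: ·) (run_split rest)
      conv_lhs => rw [hshape]
      rw [fused_replicate, fused_reset _ _ _ (drop_run_not_true rest), zero_add, ih]
      simp only [altScan]

-- ===== VERDICT (by name: the statement is the Claim_ definition above) =====
theorem longest_odd_subarray_spec : Claim_equal_longest_odd_subarray := by
  intro nums _
  unfold Spec_longest_odd_subarray longest_odd_subarray longest_odd_subarray_alt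
  rw [altPar_eq, foldA_eq_fused, fused_eq_altScan]
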